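-- pv_equiv track=rewrite | github.com/hacisalihoglutolga-lang/scanner | backend/patterns.py | _swings
-- ===== SOURCE A (Python) =====
-- def _swings(highs, lows, lb=3):
--     n = len(highs)
--     hi, lo = [], []
--     for i in range(lb, n - lb):
--         if all(highs[i] >= highs[i-j] for j in range(1, lb+1)) and \
--            all(highs[i] >= highs[i+j] for j in range(1, lb+1)):
--             hi.append(i)
--         if all(lows[i] <= lows[i-j] for j in range(1, lb+1)) and \
--            all(lows[i] <= lows[i+j] for j in range(1, lb+1)):
--             lo.append(i)
--     return hi, lo
-- ===== SOURCE B (Python) =====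
-- def _swings(highs, lows, lb=3):
--     n = len(highs)
--     hi, lo = [], []
--     if lb < 1 or n - lb <= lb:
--         return hi, lo
--     # monotonic index deques (plain lists; each holds at most the 2*lb+1 window indices,
--     # values strictly decreasing along maxq / strictly increasing along minq)
--     maxq, minq = [], []
--     for r in range(n):
--         while maxq and highs[maxq[-1]] <= highs[r]:
--             maxq.pop()
--         maxq.append(r)
--         while minq and lows[minq[-1]] >= lows[r]:
--             minq.pop()
--         minq.append(r)
--         i = r - lb
--         if i < lb:
--             continue
--         while maxq[0] < i - lb:
--             maxq.pop(0)
--         while minq[0] < i - lb: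
--             minq.pop(0)
--         if highs[i] == highs[maxq[0]]:
--             hi.append(i)
--         if lows[i] == lows[minq[0]]:
--             lo.append(i)
--     return hi, lo
-- ===== Notes on version B (the rewrite author's own statement) =====
-- stated objective: alternative
-- what changed: Replaces the per-index rescan of the 2*lb neighbours (two all() generator scans per centre) by a single left-to-right pass maintaining monotonic index deques (sliding-window maximum/minimum); an index is a swing high/low iff its value equals the window extreme at the deque front.
-- outside the precondition, e.g. on _swings([], [], -1): A returns ([-1, 0], [-1, 0]), B returns ([], []); on _swings([0, 1, 0], [0, 5], 1): A returns ([1], []), B raises IndexError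
import Mathlib
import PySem

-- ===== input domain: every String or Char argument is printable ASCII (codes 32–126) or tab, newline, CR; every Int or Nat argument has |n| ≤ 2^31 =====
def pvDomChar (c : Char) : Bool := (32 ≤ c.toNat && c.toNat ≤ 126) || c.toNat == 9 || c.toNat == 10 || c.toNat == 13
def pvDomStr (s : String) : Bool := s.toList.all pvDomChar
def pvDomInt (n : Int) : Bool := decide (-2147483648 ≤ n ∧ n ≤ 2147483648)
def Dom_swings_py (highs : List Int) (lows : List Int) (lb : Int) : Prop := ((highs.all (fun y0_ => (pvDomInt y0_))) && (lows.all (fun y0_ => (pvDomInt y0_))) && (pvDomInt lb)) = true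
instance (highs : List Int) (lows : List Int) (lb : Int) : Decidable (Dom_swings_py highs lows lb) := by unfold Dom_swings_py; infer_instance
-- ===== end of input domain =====

-- B replaces A's per-centre rescan of the 2*lb neighbours by one left-to-right pass maintaining
-- monotonic index deques (sliding-window max/min). Equivalence of return values is proved on Pre_.

-- ===== PORT A =====
-- xs[i] (index always in range on Pre_-admitted executions of A)
def pvGet (xs : List Int) (i : Int) : Int := (PySem.List.pyGet? xs i).getD 0

def swings_py (highs : List Int) (lows : List Int) (lb : Int) : List Int × List Int :=
  let n : Int := highs.length
  (PySem.List.pyRange lb (n - lb) 1).foldl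
    (fun st i =>
      (if ((PySem.List.pyRange 1 (lb + 1) 1).all fun j => decide (pvGet highs i ≥ pvGet highs (i - j)))
          && ((PySem.List.pyRange 1 (lb + 1) 1).all fun j => decide (pvGet highs i ≥ pvGet highs (i + j)))
       then st.1 ++ [i] else st.1,
       if ((PySem.List.pyRange 1 (lb + 1) 1).all fun j => decide (pvGet lows i ≤ pvGet lows (i - j)))
          && ((PySem.List.pyRange 1 (lb + 1) 1).all fun j => decide (pvGet lows i ≤ pvGet lows (i + j)))
       then st.2 ++ [i] else st.2))
    ([], [])

-- ===== PORT B =====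
-- 'while q and pred(q[-1]): q.pop()' — drop elements from the back while pred holds
def pvPopBack (p : Int → Bool) (q : List Int) : List Int :=
  match h : q.getLast? with
  | none => []
  | some x => if p x then pvPopBack p q.dropLast else q
termination_by q.length
decreasing_by
  cases q with
  | nil => simp at h
  | cons a as => simp [List.length_dropLast]

-- one iteration of B's for-loop; state = (hi, lo, maxq, minq)
def pvStep (highs : List Int) (lows : List Int) (lb : Int)
    (st : List Int × List Int × List Int × List Int) (r : Int) :
    List Int × List Int × List Int × List Int :=
  let maxq := pvPopBack (fun j => decide (pvGet highs j ≤ pvGet highs r)) st.2.2.1 ++ [r]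
  let minq := pvPopBack (fun j => decide (pvGet lows j ≥ pvGet lows r)) st.2.2.2 ++ [r]
  let i := r - lb
  if i < lb then (st.1, st.2.1, maxq, minq)
  else
    let maxq := maxq.dropWhile (fun j => decide (j < i - lb))
    let minq := minq.dropWhile (fun j => decide (j < i - lb))
    ((if pvGet highs i = pvGet highs (maxq.headD 0) then st.1 ++ [i] else st.1),
     (if pvGet lows i = pvGet lows (minq.headD 0) then st.2.1 ++ [i] else st.2.1),
     maxq, minq)

def swings_py_alt (highs : List Int) (lows : List Int) (lb : Int) : List Int × List Int :=
  let n : Int := highs.length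
  if lb < 1 ∨ n - lb ≤ lb then ([], [])
  else
    let st := (PySem.List.pyRange 0 n 1).foldl (pvStep highs lows lb) ([], [], [], [])
    (st.1, st.2.1)

-- ===== PRECONDITION & SPEC =====
-- Pre_ restricts to the natural domain of a positive lookback (for lb ≤ 0 A's vacuous neighbour
-- checks accidentally return every index of range(lb, n-lb), including out-of-bounds ones, while B
-- naturally returns no swings), and it excludes inputs whose swing loop runs while lows is shorter
-- than highs, on which A's lazy short-circuiting sometimes raises IndexError and sometimes returns.
def Pre_swings_py (highs : List Int) (lows : List Int) (lb : Int) : Prop :=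
  1 ≤ lb ∧ ((highs.length : Int) ≤ 2 * lb ∨ highs.length ≤ lows.length)
instance (highs : List Int) (lows : List Int) (lb : Int) : Decidable (Pre_swings_py highs lows lb) := by
  unfold Pre_swings_py; infer_instance

def pvWitness_swings_py : List Int × List Int × Int := ([0, 2, 1, 0, 3], [5, 1, 2, 3, 0], 1)

def Spec_swings_py (highs : List Int) (lows : List Int) (lb : Int) (out : List Int × List Int) : Prop :=
  out = swings_py_alt highs lows lb
instance (highs : List Int) (lows : List Int) (lb : Int) (out : List Int × List Int) : Decidable (Spec_swings_py highs lows lb out) := by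
  unfold Spec_swings_py; infer_instance

-- ===== CLAIM (what is proved, stated in full; the proofs are below) =====
def Claim_equal_swings_py : Prop := ∀ (highs : List Int) (lows : List Int) (lb : Int), Dom_swings_py highs lows lb → Pre_swings_py highs lows lb → Spec_swings_py highs lows lb (swings_py highs lows lb)

-- ===== LEMMAS AND PROOFS =====

-- window condition: g attains its max over [i-lb, i+lb] at i
def pvCond (g : Int → Int) (lb i : Int) : Bool :=
  (PySem.List.pyRange (i - lb) (i + lb + 1) 1).all (fun k => decide (g k ≤ g i))

-- contents of a max-deque over window [L, r]: indices that strictly beat everything after them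
def pvCand (g : Int → Int) (L r : Int) : List Int :=
  (PySem.List.pyRange L (r + 1) 1).filter
    (fun j => (PySem.List.pyRange (j + 1) (r + 1) 1).all (fun k => decide (g k < g j)))

-- one-deque abstraction of pvStep (max side; the min side is this with g := -lows)
def pvHStep (g : Int → Int) (lb : Int) (st : List Int × List Int) (r : Int) : List Int × List Int :=
  let q := pvPopBack (fun j => decide (g j ≤ g r)) st.2 ++ [r]
  if r - lb < lb then (st.1, q)
  else
    let q := q.dropWhile (fun j => decide (j < r - lb - lb))
    ((if g (r - lb) = g (q.headD 0) then st.1 ++ [r - lb] else st.1), q)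

lemma pvStep_eq (highs lows : List Int) (lb : Int) (st : List Int × List Int × List Int × List Int) (r : Int) :
    pvStep highs lows lb st r =
      ((pvHStep (pvGet highs) lb (st.1, st.2.2.1) r).1,
       (pvHStep (fun j => -(pvGet lows j)) lb (st.2.1, st.2.2.2) r).1,
       (pvHStep (pvGet highs) lb (st.1, st.2.2.1) r).2,
       (pvHStep (fun j => -(pvGet lows j)) lb (st.2.1, st.2.2.2) r).2) := by
  by_cases h : r - lb < lb <;>
    simp [pvStep, pvHStep, ge_iff_le, neg_le_neg_iff, neg_inj, h]

lemma pvFold_split (highs lows : List Int) (lb : Int) (l : List Int)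
    (hi lo mq nq : List Int) :
    l.foldl (pvStep highs lows lb) (hi, lo, mq, nq) =
      ((l.foldl (pvHStep (pvGet highs) lb) (hi, mq)).1,
       (l.foldl (pvHStep (fun j => -(pvGet lows j)) lb) (lo, nq)).1,
       (l.foldl (pvHStep (pvGet highs) lb) (hi, mq)).2,
       (l.foldl (pvHStep (fun j => -(pvGet lows j)) lb) (lo, nq)).2) := by
  induction l generalizing hi lo mq nq with
  | nil => simp
  | cons a l ih =>
    simp only [List.foldl_cons, pvStep_eq]
    rw [ih]

lemma pvPopBack_eq_reverse (p : Int → Bool) (q : List Int) :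
    pvPopBack p q = (q.reverse.dropWhile p).reverse := by
  fun_induction pvPopBack p q with
  | case1 q hq =>
    have : q = [] := by cases q <;> simp_all
    simp [this]
  | case2 q x hq hp ih =>
    have hqe : q.dropLast ++ [x] = q := List.dropLast_append_getLast? x hq
    rw [← hqe]
    simp [List.dropWhile_cons, hp, ih]
  | case3 q x hq hp =>
    have hqe : q.dropLast ++ [x] = q := List.dropLast_append_getLast? x hq
    rw [← hqe]
    simp [List.dropWhile_cons, hp]

lemma dropWhile_eq_filter_of_pairwise {R : Int → Int → Prop} (p : Int → Bool) (l : List Int)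
    (hp : l.Pairwise R) (hmono : ∀ a b, R a b → p b = true → p a = true) :
    l.dropWhile p = l.filter (fun x => !p x) := by
  induction l with
  | nil => simp
  | cons a l ih =>
    rcases List.pairwise_cons.mp hp with ⟨ha, hl⟩
    by_cases hpa : p a = true
    · simp [List.dropWhile_cons, List.filter_cons, hpa, ih hl]
    · have : ∀ x ∈ l, (!p x) = true := by
        intro x hx
        by_contra hc
        exact hpa (hmono a x (ha x hx) (by simpa using hc))
      simp [List.dropWhile_cons, List.filter_cons, hpa, List.filter_eq_self.mpr this]

lemma pvCand_sorted (g : Int → Int) (L r : Int) : (pvCand g L r).Pairwise (· < ·) := by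
  exact (PySem.List.pairwise_lt_pyRange_one L (r + 1)).filter _

lemma pvCand_mem {g : Int → Int} {L r j : Int} (h : j ∈ pvCand g L r) :
    (L ≤ j ∧ j < r + 1) ∧ ∀ k, j + 1 ≤ k → k < r + 1 → g k < g j := by
  rcases List.mem_filter.mp h with ⟨hmem, hall⟩
  refine ⟨PySem.List.mem_pyRange_one.mp hmem, ?_⟩
  intro k h1 h2
  have := List.all_eq_true.mp hall k (PySem.List.mem_pyRange_one.mpr ⟨h1, h2⟩)
  simpa using this

lemma pvCand_anti (g : Int → Int) (L r : Int) : (pvCand g L r).Pairwise (fun a b => g b < g a) := by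
  refine List.Pairwise.imp_of_mem ?_ (pvCand_sorted g L r)
  intro a b ha hb hab
  have h1 := pvCand_mem ha
  have h2 := pvCand_mem hb
  exact h1.2 b (by omega) (by omega)

lemma pvPopBack_nil (p : Int → Bool) : pvPopBack p [] = [] := by
  simp [pvPopBack_eq_reverse]

lemma pvCand_split (g : Int → Int) (L r : Int) (h : L ≤ r) :
    pvCand g L r = (pvCand g L (r - 1)).filter (fun j => decide (g r < g j)) ++ [r] := by
  unfold pvCand
  rw [PySem.List.pyRange_one_succ_right h, List.filter_append, List.filter_filter]
  have er : r - 1 + 1 = r := by omega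
  rw [er]
  congr 1
  · apply List.filter_congr
    intro j hj
    have hjm := PySem.List.mem_pyRange_one.mp hj
    rw [PySem.List.pyRange_one_succ_right (by omega : j + 1 ≤ r)]
    simp [List.all_append, Bool.and_comm]
  · simp [PySem.List.pyRange_one_eq_nil (by omega : r + 1 ≤ r + 1)]

lemma pvPopBack_filter (g : Int → Int) (r : Int) (l : List Int)
    (hanti : l.Pairwise (fun a b => g b < g a)) :
    pvPopBack (fun j => decide (g j ≤ g r)) l = l.filter (fun j => decide (g r < g j)) := by
  rw [pvPopBack_eq_reverse]
  have hrev : l.reverse.Pairwise (fun a b => g a < g b) := List.pairwise_reverse.mpr hanti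
  rw [dropWhile_eq_filter_of_pairwise _ l.reverse hrev
      (by intro a b hab hb; simp only [decide_eq_true_eq] at *; omega)]
  have hfun : (fun x => !decide (g x ≤ g r)) = (fun j => decide (g r < g j)) := by
    funext x
    by_cases h : g x ≤ g r <;> simp [h] <;> omega
  rw [hfun, List.filter_reverse, List.reverse_reverse]

lemma pvCand_push (g : Int → Int) (L r : Int) (h : L ≤ r) :
    pvPopBack (fun j => decide (g j ≤ g r)) (pvCand g L (r - 1)) ++ [r] = pvCand g L r := by
  rw [pvCand_split g L r h, pvPopBack_filter g r _ (pvCand_anti g L (r - 1))]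

lemma pyRange_filter_ge (L L' b : Int) (h : L ≤ L') :
    (PySem.List.pyRange L b 1).filter (fun j => !decide (j < L')) = PySem.List.pyRange L' b 1 := by
  have H : ∀ (d : Nat) (L : Int), L' - L ≤ d → L ≤ L' →
      (PySem.List.pyRange L b 1).filter (fun j => !decide (j < L')) = PySem.List.pyRange L' b 1 := by
    intro d
    induction d with
    | zero =>
      intro L hd hL
      have : L = L' := by omega
      subst this
      apply List.filter_eq_self.mpr
      intro a ha
      have := PySem.List.mem_pyRange_one.mp ha
      simp only [Bool.not_eq_eq_eq_not, Bool.not_true, decide_eq_false_iff_not]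
      omega
    | succ d ih =>
      intro L hd hL
      by_cases hLL : L' ≤ L
      · have : L = L' := by omega
        subst this
        apply List.filter_eq_self.mpr
        intro a ha
        have := PySem.List.mem_pyRange_one.mp ha
        simp only [Bool.not_eq_eq_eq_not, Bool.not_true, decide_eq_false_iff_not]
        omega
      · by_cases hb : b ≤ L
        · rw [PySem.List.pyRange_one_eq_nil hb, PySem.List.pyRange_one_eq_nil (by omega)]
          rfl
        · rw [PySem.List.pyRange_one_cons (by omega : L < b), List.filter_cons]
          have hf : (!decide (L < L')) = false := by simp; omega
          rw [hf]
          simpa using ih (L + 1) (by omega) (by omega)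
  exact H (L' - L).toNat L (by omega) h

lemma pvCand_expire (g : Int → Int) (L L' r : Int) (h : L ≤ L') :
    (pvCand g L r).dropWhile (fun j => decide (j < L')) = pvCand g L' r := by
  rw [dropWhile_eq_filter_of_pairwise _ _ (pvCand_sorted g L r)
      (by intro a b hab hb; simp only [decide_eq_true_eq] at *; omega)]
  unfold pvCand
  rw [List.filter_filter, ← pyRange_filter_ge L L' (r + 1) h, List.filter_filter]
  exact List.filter_congr (fun x _ => Bool.and_comm _ _)

lemma pvCand_cons (g : Int → Int) (L r : Int) (h : L ≤ r) :
    pvCand g L r =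
      (if (PySem.List.pyRange (L + 1) (r + 1) 1).all (fun k => decide (g k < g L))
       then L :: pvCand g (L + 1) r else pvCand g (L + 1) r) := by
  unfold pvCand
  rw [PySem.List.pyRange_one_cons (by omega : L < r + 1), List.filter_cons]

lemma pvCand_self (g : Int → Int) (r : Int) : pvCand g r r = [r] := by
  unfold pvCand
  rw [PySem.List.pyRange_one_singleton]
  simp [PySem.List.pyRange_one_eq_nil (by omega : r + 1 ≤ r + 1)]

lemma pvCand_head_max (g : Int → Int) (L r : Int) (h : L ≤ r) :
    pvCand g L r ≠ [] ∧ ∀ k, L ≤ k → k ≤ r → g k ≤ g ((pvCand g L r).headD 0) := by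
  have H : ∀ (d : Nat) (L : Int), r - L ≤ d → L ≤ r →
      pvCand g L r ≠ [] ∧ ∀ k, L ≤ k → k ≤ r → g k ≤ g ((pvCand g L r).headD 0) := by
    intro d
    induction d with
    | zero =>
      intro L hd hL
      have : L = r := by omega
      subst this
      rw [pvCand_self]
      refine ⟨by simp, ?_⟩
      intro k h1 h2
      have : k = L := by omega
      simp [this]
    | succ d ih =>
      intro L hd hL
      by_cases hr : r ≤ L
      · have : L = r := by omega
        subst this
        rw [pvCand_self]
        refine ⟨by simp, ?_⟩
        intro k h1 h2
        have : k = L := by omega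
        simp [this]
      · rw [pvCand_cons g L r hL]
        obtain ⟨ihne, ihmax⟩ := ih (L + 1) (by omega) (by omega)
        by_cases hPL : (PySem.List.pyRange (L + 1) (r + 1) 1).all (fun k => decide (g k < g L)) = true
        · rw [if_pos hPL]
          refine ⟨by simp, ?_⟩
          intro k h1 h2
          simp only [List.headD_cons]
          by_cases hk : k = L
          · simp [hk]
          · have := List.all_eq_true.mp hPL k (PySem.List.mem_pyRange_one.mpr ⟨by omega, by omega⟩)
            simp only [decide_eq_true_eq] at this
            omega
        · rw [if_neg hPL]
          refine ⟨ihne, ?_⟩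
          intro k h1 h2
          by_cases hk : L + 1 ≤ k
          · exact ihmax k hk h2
          · have hkL : k = L := by omega
            have : ∃ k', k' ∈ PySem.List.pyRange (L + 1) (r + 1) 1 ∧ ¬ g k' < g L := by
              by_contra hc
              push_neg at hc
              exact hPL (List.all_eq_true.mpr (fun k' hk' => by simp [hc k' hk']))
            obtain ⟨k', hk'm, hk'⟩ := this
            have hb := PySem.List.mem_pyRange_one.mp hk'm
            have := ihmax k' (by omega) (by omega)
            subst hkL
            omega
  exact H (r - L).toNat L (by omega) h

lemma pvCond_iff_head (g : Int → Int) (lb i : Int) (hlb : 1 ≤ lb) :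
    (g i = g ((pvCand g (i - lb) (i + lb)).headD 0)) ↔ pvCond g lb i = true := by
  obtain ⟨hne, hmax⟩ := pvCand_head_max g (i - lb) (i + lb) (by omega)
  have hmem : (pvCand g (i - lb) (i + lb)).headD 0 ∈ pvCand g (i - lb) (i + lb) := by
    cases h : pvCand g (i - lb) (i + lb) with
    | nil => exact absurd h hne
    | cons a l => simp
  obtain ⟨⟨hm1, hm2⟩, -⟩ := pvCand_mem hmem
  constructor
  · intro heq
    apply List.all_eq_true.mpr
    intro k hk
    have hkb := PySem.List.mem_pyRange_one.mp hk
    have := hmax k (by omega) (by omega)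
    simp only [decide_eq_true_eq]
    omega
  · intro hc
    have hhd := List.all_eq_true.mp hc ((pvCand g (i - lb) (i + lb)).headD 0)
      (PySem.List.mem_pyRange_one.mpr ⟨by omega, by omega⟩)
    simp only [decide_eq_true_eq] at hhd
    have := hmax i (by omega) (by omega)
    omega

lemma pvHFold_inv (g : Int → Int) (lb : Int) (hlb : 1 ≤ lb) (m : Nat) :
    (PySem.List.pyRange 0 ((m : Int) + 1) 1).foldl (pvHStep g lb) ([], []) =
      ((PySem.List.pyRange lb ((m : Int) - lb + 1) 1).filter (pvCond g lb),
       pvCand g (if (m : Int) < 2 * lb then 0 else (m : Int) - 2 * lb) m) := by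
  induction m with
  | zero =>
    rw [show ((0 : Nat) : Int) = 0 from rfl, show PySem.List.pyRange 0 (0 + 1) 1 = [0] from
      PySem.List.pyRange_one_singleton 0]
    simp only [List.foldl_cons, List.foldl_nil, pvHStep, pvPopBack_nil, List.nil_append]
    rw [if_pos (by omega : (0 : Int) - lb < lb), if_pos (by omega : (0 : Int) < 2 * lb),
      PySem.List.pyRange_one_eq_nil (by omega : (0 : Int) - lb + 1 ≤ lb)]
    rw [show (0 : Int) = ((0 : Int)) from rfl]
    rw [show pvCand g 0 0 = [0] from pvCand_self g 0]
    simp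
  | succ m ih =>
    have hc : ((m + 1 : Nat) : Int) = (m : Int) + 1 := by push_cast; ring
    rw [hc, PySem.List.pyRange_one_succ_right (by omega : (0 : Int) ≤ (m : Int) + 1),
      List.foldl_append, ih]
    have hpush : pvPopBack (fun j => decide (g j ≤ g ((m : Int) + 1)))
        (pvCand g (if (m : Int) < 2 * lb then 0 else (m : Int) - 2 * lb) (m : Int)) ++ [(m : Int) + 1] =
        pvCand g (if (m : Int) < 2 * lb then 0 else (m : Int) - 2 * lb) ((m : Int) + 1) := by
      have := pvCand_push g (if (m : Int) < 2 * lb then 0 else (m : Int) - 2 * lb) ((m : Int) + 1)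
        (by split <;> omega)
      rwa [show (m : Int) + 1 - 1 = (m : Int) by omega] at this
    simp only [List.foldl_cons, List.foldl_nil, pvHStep, hpush]
    by_cases hbig : (m : Int) + 1 - lb < lb
    · rw [if_pos hbig, if_pos (by omega : (m : Int) + 1 < 2 * lb)]
      have h0 : ((if (m : Int) < 2 * lb then (0 : Int) else (m : Int) - 2 * lb)) = 0 :=
        if_pos (by omega)
      rw [h0]
      rw [PySem.List.pyRange_one_eq_nil (by omega : (m : Int) - lb + 1 ≤ lb),
        PySem.List.pyRange_one_eq_nil (by omega : (m : Int) + 1 - lb + 1 ≤ lb)]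
    · rw [if_neg hbig, if_neg (by omega : ¬ ((m : Int) + 1 < 2 * lb))]
      have hexp : (pvCand g (if (m : Int) < 2 * lb then 0 else (m : Int) - 2 * lb)
            ((m : Int) + 1)).dropWhile (fun j => decide (j < (m : Int) + 1 - lb - lb)) =
          pvCand g ((m : Int) + 1 - 2 * lb) ((m : Int) + 1) := by
        have e : (m : Int) + 1 - lb - lb = (m : Int) + 1 - 2 * lb := by omega
        rw [show (fun j => decide (j < (m : Int) + 1 - lb - lb)) =
            (fun j => decide (j < (m : Int) + 1 - 2 * lb)) from by rw [e]]
        exact pvCand_expire g _ _ _ (by split <;> omega)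
      rw [hexp]
      have hhead := pvCond_iff_head g lb ((m : Int) + 1 - lb) hlb
      rw [show (m : Int) + 1 - lb + lb = (m : Int) + 1 by omega,
        show (m : Int) + 1 - lb - lb = (m : Int) + 1 - 2 * lb by omega] at hhead
      rw [if_congr hhead rfl rfl]
      rw [show (m : Int) - lb + 1 = (m : Int) + 1 - lb - 1 + 1 by omega,
        show (m : Int) + 1 - lb + 1 = ((m : Int) + 1 - lb - 1 + 1) + 1 by omega,
        PySem.List.pyRange_one_succ_right (by omega : lb ≤ (m : Int) + 1 - lb - 1 + 1),
        List.filter_append]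
      rw [show (m : Int) + 1 - lb - 1 + 1 = (m : Int) + 1 - lb by omega]
      by_cases hcc : pvCond g lb ((m : Int) + 1 - lb) = true <;> simp [hcc]

lemma foldl_pair_filter (p q : Int → Bool) (l : List Int) (h t : List Int) :
    l.foldl (fun st i => (if p i then st.1 ++ [i] else st.1, if q i then st.2 ++ [i] else st.2)) (h, t) =
      (h ++ l.filter p, t ++ l.filter q) := by
  induction l generalizing h t with
  | nil => simp
  | cons a l ih => simp [List.foldl_cons, ih]; constructor <;> split <;> simp_all [List.filter_cons]

lemma pvCond_hi (highs : List Int) (lb i : Int) (hlb : 1 ≤ lb) :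
    (((PySem.List.pyRange 1 (lb + 1) 1).all fun j => decide (pvGet highs i ≥ pvGet highs (i - j)))
      && ((PySem.List.pyRange 1 (lb + 1) 1).all fun j => decide (pvGet highs i ≥ pvGet highs (i + j))))
    = pvCond (pvGet highs) lb i := by
  rw [Bool.eq_iff_iff]
  simp only [pvCond, Bool.and_eq_true, List.all_eq_true, PySem.List.mem_pyRange_one,
    decide_eq_true_eq, ge_iff_le, and_imp]
  constructor
  · rintro ⟨h1, h2⟩ k hk1 hk2
    rcases lt_trichotomy k i with hki | hki | hki
    · have h := h1 (i - k) (by omega) (by omega)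
      rwa [show i - (i - k) = k by omega] at h
    · subst hki; exact le_refl _
    · have h := h2 (k - i) (by omega) (by omega)
      rwa [show i + (k - i) = k by omega] at h
  · intro h
    exact ⟨fun j hj1 hj2 => h (i - j) (by omega) (by omega),
           fun j hj1 hj2 => h (i + j) (by omega) (by omega)⟩

lemma pvCond_lo (lows : List Int) (lb i : Int) (hlb : 1 ≤ lb) :
    (((PySem.List.pyRange 1 (lb + 1) 1).all fun j => decide (pvGet lows i ≤ pvGet lows (i - j)))
      && ((PySem.List.pyRange 1 (lb + 1) 1).all fun j => decide (pvGet lows i ≤ pvGet lows (i + j))))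
    = pvCond (fun j => -(pvGet lows j)) lb i := by
  rw [Bool.eq_iff_iff]
  simp only [pvCond, Bool.and_eq_true, List.all_eq_true, PySem.List.mem_pyRange_one,
    decide_eq_true_eq, neg_le_neg_iff, and_imp]
  constructor
  · rintro ⟨h1, h2⟩ k hk1 hk2
    rcases lt_trichotomy k i with hki | hki | hki
    · have h := h1 (i - k) (by omega) (by omega)
      rwa [show i - (i - k) = k by omega] at h
    · subst hki; exact le_refl _
    · have h := h2 (k - i) (by omega) (by omega)
      rwa [show i + (k - i) = k by omega] at h
  · intro h
    exact ⟨fun j hj1 hj2 => h (i - j) (by omega) (by omega),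
           fun j hj1 hj2 => h (i + j) (by omega) (by omega)⟩

-- ===== VERDICT (by name: the statement is the Claim_ definition above) =====
theorem swings_py_spec : Claim_equal_swings_py := by
  intro highs lows lb _ hpre
  obtain ⟨hlb, -⟩ := hpre
  unfold Spec_swings_py
  by_cases hn : (highs.length : Int) - lb ≤ lb
  · simp [swings_py, swings_py_alt, PySem.List.pyRange_one_eq_nil hn, hn]
  · have hlen : 2 * lb < (highs.length : Int) := by omega
    have hlen1 : 1 ≤ highs.length := by omega
    simp only [swings_py, swings_py_alt]
    rw [if_neg (by omega)]
    rw [foldl_pair_filter]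
    have hm : ((highs.length - 1 : Nat) : Int) = (highs.length : Int) - 1 := by
      omega
    rw [show (highs.length : Int) = ((highs.length - 1 : Nat) : Int) + 1 by omega]
    rw [pvFold_split, pvHFold_inv (pvGet highs) lb hlb (highs.length - 1),
      pvHFold_inv (fun j => -(pvGet lows j)) lb hlb (highs.length - 1)]
    rw [show ((highs.length - 1 : Nat) : Int) - lb + 1 = ((highs.length - 1 : Nat) : Int) + 1 - lb by omega]
    simp only [List.nil_append]
    exact Prod.ext
      (List.filter_congr (fun i _ => pvCond_hi highs lb i hlb))
      (List.filter_congr (fun i _ => pvCond_lo lows lb i hlb))
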